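-- pv_equiv track=rewrite | github.com/andreykil/dl-bhw-2 | src/inference.py | _get_banned_tokens_for_ngrams
-- ===== SOURCE A (Python) =====
-- from typing import List, Optional
--
-- def _get_banned_tokens_for_ngrams(hyp_tokens: List[int], n: int) -> set:
--     """
--     Возвращает множество токенов, которые приведут к повтору n-грам при добавлении их в конец hyp_tokens.
--     hyp_tokens - список токенов (идов), включая BOS.
--     n - размер n-gram, если <=1 возвращается пустое множество.
--     """
--     if n <= 1 or len(hyp_tokens) + 1 < n:
--         return set()
--     banned = set()
--     # last (n-1) tokens
--     prefix = tuple(hyp_tokens[-(n-1):])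
--     for i in range(len(hyp_tokens) - (n - 1)):
--         if tuple(hyp_tokens[i:i + (n - 1)]) == prefix and (i + n - 1) < len(hyp_tokens):
--             banned.add(hyp_tokens[i + n - 1])
--     return banned
-- ===== SOURCE B (Python) =====
-- def _get_banned_tokens_for_ngrams(hyp_tokens, n):
--     if n <= 1 or len(hyp_tokens) + 1 < n:
--         return set()
--     m = n - 1
--     prefix = hyp_tokens[len(hyp_tokens) - m:]
--     banned = set()
--     window = []
--     for tok in hyp_tokens:
--         if window == prefix:
--             banned.add(tok)
--         window.append(tok)
--         if len(window) > m:
--             window.pop(0)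
--     return banned
-- ===== Notes on version B (the rewrite author's own statement) =====
-- stated objective: alternative
-- what changed: B makes a single sliding-window pass over the tokens themselves, maintaining the last n-1 tokens in a window and banning the current token whenever the window equals the final prefix, instead of A's indexed loop that slices and compares every (n-1)-gram against the prefix.
import Mathlib
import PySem

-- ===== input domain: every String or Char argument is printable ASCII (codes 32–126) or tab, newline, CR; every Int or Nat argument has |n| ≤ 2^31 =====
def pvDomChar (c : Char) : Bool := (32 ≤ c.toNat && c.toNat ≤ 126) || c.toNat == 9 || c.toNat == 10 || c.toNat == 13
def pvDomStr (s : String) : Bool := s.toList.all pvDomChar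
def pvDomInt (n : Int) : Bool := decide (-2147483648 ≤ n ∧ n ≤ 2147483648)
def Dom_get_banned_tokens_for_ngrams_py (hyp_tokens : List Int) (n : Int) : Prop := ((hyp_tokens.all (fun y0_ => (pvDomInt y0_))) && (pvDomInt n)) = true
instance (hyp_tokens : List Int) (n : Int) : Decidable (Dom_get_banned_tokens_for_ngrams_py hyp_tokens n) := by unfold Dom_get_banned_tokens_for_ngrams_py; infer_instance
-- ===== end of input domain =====

-- B replaces A's indexed loop of slice-vs-prefix comparisons by a single sliding-window pass
-- over the tokens themselves (no index arithmetic, no slicing in the loop); objective: alternative.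

-- ===== PORT A =====
def get_banned_tokens_for_ngrams_py (hyp_tokens : List Int) (n : Int) : List Int :=
  if n ≤ 1 ∨ (hyp_tokens.length : Int) + 1 < n then []
  else
    let pre := PySem.List.slice hyp_tokens (some (-(n-1))) none
    (PySem.List.pyRange 0 ((hyp_tokens.length : Int) - (n-1)) 1).foldl
      (fun banned i =>
        if PySem.List.slice hyp_tokens (some i) (some (i + (n-1))) = pre
           ∧ i + n - 1 < (hyp_tokens.length : Int) then
          PySem.Set.add banned (PySem.List.pyGetD hyp_tokens (i + n - 1) 0)
        else banned) []

-- ===== PORT B ===== (sliding window of the last n-1 tokens; window.pop(0) is drop 1)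
def get_banned_tokens_for_ngrams_py_alt (hyp_tokens : List Int) (n : Int) : List Int :=
  if n ≤ 1 ∨ (hyp_tokens.length : Int) + 1 < n then []
  else
    let m := n - 1
    let pre := PySem.List.slice hyp_tokens (some ((hyp_tokens.length : Int) - m)) none
    (hyp_tokens.foldl
      (fun (st : List Int × List Int) tok =>
        let banned := if st.2 = pre then PySem.Set.add st.1 tok else st.1
        let w := st.2 ++ [tok]
        (banned, if (w.length : Int) > m then w.drop 1 else w))
      ([], [])).1

-- ===== PRECONDITION & SPEC =====
def Spec_get_banned_tokens_for_ngrams_py (hyp_tokens : List Int) (n : Int) (out : List Int) : Prop := out = get_banned_tokens_for_ngrams_py_alt hyp_tokens n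
instance (hyp_tokens : List Int) (n : Int) (out : List Int) : Decidable (Spec_get_banned_tokens_for_ngrams_py hyp_tokens n out) := by unfold Spec_get_banned_tokens_for_ngrams_py; infer_instance

-- ===== CLAIM =====
def Claim_equal_get_banned_tokens_for_ngrams_py : Prop := ∀ (hyp_tokens : List Int) (n : Int), Dom_get_banned_tokens_for_ngrams_py hyp_tokens n → Spec_get_banned_tokens_for_ngrams_py hyp_tokens n (get_banned_tokens_for_ngrams_py hyp_tokens n)

-- ===== LEMMAS AND PROOFS =====

-- common normal form of both loops: fold over start indices i, banning L[i+m'] when the window matches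
def pvF (L pre : List Int) (m' : Nat) : List Int → Nat → List Int :=
  fun b i => if (L.drop i).take m' = pre then PySem.Set.add b (L.getD (i + m') 0) else b

-- invariant of B's pass: after j tokens the window is the last ≤ m' of them and
-- banned equals the index-fold over the j - m' completed windows
theorem pvB_inv (L pre : List Int) (m' : Nat) (hm : 1 ≤ m') (hpre : pre.length = m')
    (j : Nat) (hj : j ≤ L.length) :
    (L.take j).foldl
      (fun (st : List Int × List Int) tok =>
        (if st.2 = pre then PySem.Set.add st.1 tok else st.1,
         if (((st.2 ++ [tok]).length : Int)) > (m' : Int) then (st.2 ++ [tok]).drop 1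
         else st.2 ++ [tok]))
      ([], [])
    = ((List.range (j - m')).foldl (pvF L pre m') [], (L.take j).drop (j - m')) := by
  induction j with
  | zero => simp
  | succ j ih =>
    have hjlt : j < L.length := by omega
    have htake : L.take (j+1) = L.take j ++ [L[j]] := by
      rw [List.take_add_one, List.getElem?_eq_getElem hjlt]; rfl
    rw [htake, List.foldl_append, ih (by omega)]
    simp only [List.foldl_cons, List.foldl_nil]
    have hwlen : ((L.take j).drop (j - m')).length = j - (j - m') := by
      simp [List.length_drop, List.length_take, Nat.min_eq_left (le_of_lt hjlt)]
    by_cases hcase : j < m'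
    · have h0 : j - m' = 0 := by omega
      have h1 : j + 1 - m' = 0 := by omega
      simp only [h0, h1, List.drop_zero, List.range_zero, List.foldl_nil]
      have hne : ¬ (L.take j = pre) := by
        intro h
        have : (L.take j).length = j := by
          simp [List.length_take, Nat.min_eq_left (le_of_lt hjlt)]
        rw [h, hpre] at this; omega
      have hlen2 : ¬ (((L.take j ++ [L[j]]).length : Int) > (m' : Int)) := by
        simp [List.length_take]; omega
      rw [if_neg hne, if_neg hlen2, ← htake]
    · -- full window: it is L[j-m' : j], the fold gains index j - m', window slides
      have hwin : (L.take j).drop (j - m') = (L.drop (j - m')).take m' := by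
        rw [List.drop_take]
        congr 1
        omega
      have hlen2 : ((((L.take j).drop (j - m')) ++ [L[j]]).length : Int) > (m' : Int) := by
        simp [hwlen]; omega
      have hrange : j + 1 - m' = (j - m') + 1 := by omega
      refine Prod.ext ?_ ?_
      · -- banned component
        rw [hrange, List.range_succ, List.foldl_append, List.foldl_cons, List.foldl_nil]
        unfold pvF
        have hgetD : L.getD (j - m' + m') 0 = L[j] := by
          have hjj : j - m' + m' = j := by omega
          rw [hjj]; exact List.getD_eq_getElem L 0 hjlt
        rw [hwin, hgetD]
      · -- window component
        simp only [if_pos hlen2]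
        have htj : (L.take j).length = j := by
          simp [List.length_take, Nat.min_eq_left (le_of_lt hjlt)]
        have hdrop1 : (((L.take j).drop (j - m')) ++ [L[j]]).drop 1
            = (L.take j).drop ((j - m') + 1) ++ [L[j]] := by
          have hlen1 : 1 ≤ ((L.take j).drop (j - m')).length := by
            simp [List.length_drop, List.length_take]; omega
          rw [List.drop_append_of_le_length hlen1, List.drop_drop]
        rw [hdrop1, hrange, List.drop_append_of_le_length (by rw [htj]; omega)]

theorem get_banned_py_eq (L : List Int) (n : Int) :
    get_banned_tokens_for_ngrams_py L n = get_banned_tokens_for_ngrams_py_alt L n := by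
  unfold get_banned_tokens_for_ngrams_py get_banned_tokens_for_ngrams_py_alt
  by_cases hg : n ≤ 1 ∨ (L.length : Int) + 1 < n
  · rw [if_pos hg, if_pos hg]
  · rw [if_neg hg, if_neg hg]
    rw [not_or, not_le, not_lt] at hg
    obtain ⟨hn2, hnlen⟩ := hg
    obtain ⟨m', hm'⟩ : ∃ m' : Nat, n - 1 = (m' : Int) := ⟨(n-1).toNat, by omega⟩
    have hm1 : 1 ≤ m' := by omega
    have hmlen : m' ≤ L.length := by omega
    have hcast : (L.length : Int) - (m' : Int) = ((L.length - m' : Nat) : Int) := by omega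
    have hprelen : (L.drop (L.length - m')).length = m' := by
      simp [List.length_drop]; omega
    dsimp only
    rw [hm', hcast, PySem.List.pyRange_zero_natCast, List.foldl_map,
        PySem.List.slice_from_neg_natCast L m' (by omega), PySem.List.slice_from_natCast]
    have hB : (L.foldl
        (fun (st : List Int × List Int) tok =>
          (if st.2 = L.drop (L.length - m') then PySem.Set.add st.1 tok else st.1,
           if (((st.2 ++ [tok]).length : Int)) > (m' : Int) then (st.2 ++ [tok]).drop 1
           else st.2 ++ [tok]))
        ([], [])).1
        = (List.range (L.length - m')).foldl (pvF L (L.drop (L.length - m')) m') [] := by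
      have h := pvB_inv L (L.drop (L.length - m')) m' hm1 hprelen L.length (le_refl _)
      rw [List.take_length] at h
      rw [h]
    rw [hB]
    apply PySem.List.foldl_congr_mem
    intro acc i hi
    rw [List.mem_range] at hi
    have hidx : (i : Int) + n - 1 = ((i + m' : Nat) : Int) := by omega
    have hbound : ((i + m' : Nat) : Int) < (L.length : Int) := by omega
    unfold pvF
    rw [PySem.List.slice_natCast_add]
    simp only [hidx, PySem.List.pyGetD_natCast, eq_true hbound, and_true,
      List.getD_eq_getElem?_getD]

-- ===== VERDICT =====
theorem get_banned_tokens_for_ngrams_py_spec : Claim_equal_get_banned_tokens_for_ngrams_py := by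
  intro hyp_tokens n _
  exact get_banned_py_eq hyp_tokens n
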